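-- pv_equiv track=rewrite | github.com/alexeyshesh/diploma | datasets/dataset_creator.py | get_author_files
-- ===== SOURCE A (Python) =====
-- def get_author_files(files: list) -> dict:
--     """Разделение файлов по автору, указанному в формате автор_название.txt"""
--     res = {}
--     for filename in files:
--         author = filename.split('/')[-1].split('_')[0]
--         if author in res:
--             res[author].append(filename)
--         else:
--             res[author] = [filename]
--
--     return res
-- ===== SOURCE B (Python) =====
-- def get_author_files(files: list) -> dict:
--     """Разделение файлов по автору, указанному в формате автор_название.txt"""
--     keys = [f.split('/')[-1].split('_')[0] for f in files]
--     authors = list(dict.fromkeys(keys))  # distinct authors, first-occurrence order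
--     return {a: [f for f, k in zip(files, keys) if k == a] for a in authors}
-- ===== Notes on version B (the rewrite author's own statement) =====
-- stated objective: alternative
-- what changed: Replaces A's single-pass dict mutation (append-or-create per file) by a gather-by-key algorithm with no dict mutation at all: compute the distinct authors once in first-occurrence order, then build each group in one shot by filtering the (file, key) pairs for that author.
import Mathlib
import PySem

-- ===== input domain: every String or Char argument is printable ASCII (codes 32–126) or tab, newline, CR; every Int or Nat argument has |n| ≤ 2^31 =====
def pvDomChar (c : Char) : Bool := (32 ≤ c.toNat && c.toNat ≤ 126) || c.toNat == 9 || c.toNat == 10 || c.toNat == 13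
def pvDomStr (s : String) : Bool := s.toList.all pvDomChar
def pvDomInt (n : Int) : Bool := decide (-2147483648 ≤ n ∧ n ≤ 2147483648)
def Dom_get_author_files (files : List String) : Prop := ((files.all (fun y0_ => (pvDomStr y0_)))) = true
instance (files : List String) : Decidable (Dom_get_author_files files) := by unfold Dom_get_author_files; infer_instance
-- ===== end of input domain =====

-- B replaces A's single-pass dict mutation by a gather-by-key algorithm without dict
-- mutation: distinct authors first (first-occurrence order), then one filter per author.

-- shared helper: filename.split('/')[-1].split('_')[0]
-- (split? is `some` of a nonempty list whenever the separator is nonempty, so the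
-- getD/getLastD/headD defaults are never reached — exact for Python's split here)
def pvAuthor (f : String) : String :=
  let last := ((PySem.Str.split? f "/").getD []).getLastD ""
  ((PySem.Str.split? last "_").getD []).headD ""

-- ===== PORT A =====
def get_author_files (files : List String) : List (String × List String) :=
  (files.foldl (fun res filename =>
      let author := pvAuthor filename
      if res.contains author then
        res.modify author [] (· ++ [filename])      -- res[author].append(filename)
      else
        res.insert author [filename]                 -- res[author] = [filename]
    ) PySem.Dict.empty).items

-- ===== PORT B =====
def get_author_files_alt (files : List String) : List (String × List String) :=
  let keys := files.map pvAuthor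
  let authors := PySem.List.dedup keys               -- list(dict.fromkeys(keys))
  authors.map (fun a =>
    (a, ((files.zip keys).filter (fun p => p.2 == a)).map (·.1)))

-- ===== PRECONDITION & SPEC =====
def Spec_get_author_files (files : List String) (out : List (String × List String)) : Prop := out = get_author_files_alt files
instance (files : List String) (out : List (String × List String)) : Decidable (Spec_get_author_files files out) := by unfold Spec_get_author_files; infer_instance

-- ===== CLAIM (what is proved, stated in full; the proofs are below) =====
def Claim_equal_get_author_files : Prop := ∀ (files : List String), Dom_get_author_files files → Spec_get_author_files files (get_author_files files)

-- ===== LEMMAS AND PROOFS =====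

lemma pv_zip_eq (files : List String) :
    files.zip (files.map pvAuthor) = files.map (fun f => (f, pvAuthor f)) := by
  induction files with
  | nil => rfl
  | cons f fs ih => simp [ih]

-- A's branch "append if present, create if absent" is exactly Dict.modify with default []
lemma pv_step_eq (res : PySem.Dict String (List String)) (filename : String) :
    (if res.contains (pvAuthor filename) then
        res.modify (pvAuthor filename) [] (· ++ [filename])
      else res.insert (pvAuthor filename) [filename])
    = res.modify (pvAuthor filename) [] (· ++ [filename]) := by
  unfold PySem.Dict.modify
  split_ifs with h
  · rfl
  · simp [PySem.Dict.getD_of_not_contains, h]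

lemma pv_a_eq_alt (files : List String) : get_author_files files = get_author_files_alt files := by
  unfold get_author_files get_author_files_alt
  have hfold : files.foldl (fun res filename =>
      let author := pvAuthor filename
      if res.contains author then res.modify author [] (· ++ [filename])
      else res.insert author [filename]) PySem.Dict.empty
      = (files.map (fun f => (pvAuthor f, f))).foldl
          (fun (res : PySem.Dict String (List String)) p =>
            res.modify p.1 [] (· ++ [p.2])) PySem.Dict.empty := by
    rw [List.foldl_map]
    exact PySem.List.foldl_congr_mem files _ _ _ (fun res x _ => pv_step_eq res x)
  rw [hfold]
  set d := (files.map (fun f => (pvAuthor f, f))).foldl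
      (fun (res : PySem.Dict String (List String)) p =>
        res.modify p.1 [] (· ++ [p.2])) PySem.Dict.empty with hd
  have hkeys : d.keys = PySem.List.dedup (files.map pvAuthor) := by
    rw [hd, PySem.Dict.keys_foldl_modify_key]
    simp only [PySem.Dict.keys_empty, PySem.Set.update_nil_left, ← PySem.List.dedup_eq_ofList,
      List.map_map, Function.comp_def]
  have hnodup : d.keys.Nodup := by
    rw [hd]
    exact PySem.Dict.nodup_keys_foldl_modify_key _ _ [] _ _ (by simp [PySem.Dict.keys_empty])
  rw [PySem.Dict.items_eq_map_keys d hnodup [], hkeys]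
  apply List.map_congr_left
  intro a _
  rw [hd, PySem.Dict.getD_foldl_modify_append]
  rw [pv_zip_eq]
  simp [PySem.Dict.getD_empty, List.filter_map, List.map_map, Function.comp_def]

-- ===== VERDICT (by name: the statement is the Claim_ definition above) =====
theorem get_author_files_spec : Claim_equal_get_author_files := by
  intro files _
  unfold Spec_get_author_files
  exact pv_a_eq_alt files
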